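-- pv_equiv track=rewrite | github.com/pypi-data/pypi-mirror-308 | packages/fastfetchbot-telegram-bot/fastfetchbot_telegram_bot-0.1.0.tar.gz/fastfetchbot_telegram_bot-0.1.0/fastfetchbot_telegram_bot/config.py | ban_list_resolver
-- ===== SOURCE A (Python) =====
-- def ban_list_resolver(ban_list_string: str) -> list:
--     ban_list = ban_list_string.split(",")
--     for item in ban_list:
--         if item == "social_media":
--             ban_list.extend(
--                 [
--                     "weibo",
--                     "twitter",
--                     "instagram",
--                     "zhihu",
--                     "douban",
--                     "wechat",
--                     "xiaohongshu",
--                     "reddit",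
--                 ]
--             )
--         elif item == "video":
--             ban_list.extend(["youtube", "bilibili"])
--     return ban_list
-- ===== SOURCE B (Python) =====
-- _MAPPING = {
--     "social_media": [
--         "weibo", "twitter", "instagram", "zhihu",
--         "douban", "wechat", "xiaohongshu", "reddit",
--     ],
--     "video": ["youtube", "bilibili"],
-- }
--
--
-- def ban_list_resolver(ban_list_string: str) -> list:
--     # Single left-to-right scan of the raw string: peel one token at a time
--     # with str.partition (no split() call, no list re-iteration), keeping the
--     # original tokens and their expansions in two separate accumulators.
--     tokens = []
--     expansions = []
--     rest = ban_list_string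
--     while True:
--         head, sep, rest = rest.partition(",")
--         tokens.append(head)
--         expansions += _MAPPING.get(head, [])
--         if not sep:
--             return tokens + expansions
-- ===== Notes on version B (the rewrite author's own statement) =====
-- stated objective: alternative
-- what changed: A splits the whole string, then iterates a list it keeps extending while iterating; B never calls split: it scans the raw string once, peeling one token at a time with str.partition and maintaining two separate accumulators (tokens, expansions) that are concatenated at the end.
import Mathlib
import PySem

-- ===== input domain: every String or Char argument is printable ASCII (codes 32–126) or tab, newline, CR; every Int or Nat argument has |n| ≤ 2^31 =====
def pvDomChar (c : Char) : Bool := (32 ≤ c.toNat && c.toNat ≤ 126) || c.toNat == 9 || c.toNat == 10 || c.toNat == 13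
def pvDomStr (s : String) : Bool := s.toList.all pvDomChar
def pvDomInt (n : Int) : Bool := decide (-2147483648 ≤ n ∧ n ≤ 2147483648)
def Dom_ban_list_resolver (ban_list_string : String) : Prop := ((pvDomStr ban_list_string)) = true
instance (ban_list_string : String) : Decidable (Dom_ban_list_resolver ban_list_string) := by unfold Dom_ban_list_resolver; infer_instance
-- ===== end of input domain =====

-- B scans the raw string once, peeling tokens with str.partition into two
-- separate accumulators, instead of A's split-then-iterate-a-self-growing-list
-- (objective: alternative).

-- ===== PORT A =====
-- what A's if/elif appends for one visited item
def pvExpandA (s : String) : List String :=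
  if s = "social_media" then
    ["weibo", "twitter", "instagram", "zhihu", "douban", "wechat", "xiaohongshu", "reddit"]
  else if s = "video" then
    ["youtube", "bilibili"]
  else []

-- Python's `for item in ban_list` over a list mutated by `extend`: `processed` is the
-- prefix already visited, `todo` the suffix still to visit; `extend` appends at the end
-- of `todo`.  Terminates because appended words are never themselves keys.
def pvLoopA (processed todo : List String) : List String :=
  match todo with
  | [] => processed
  | x :: rest => pvLoopA (processed ++ [x]) (rest ++ pvExpandA x)
termination_by todo.length + 9 * (todo.countP (fun s => s == "social_media" || s == "video"))
decreasing_by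
  by_cases h1 : x = "social_media" <;> by_cases h2 : x = "video" <;>
    simp_all [pvExpandA, List.countP_append, List.length_append] <;> omega

def ban_list_resolver (ban_list_string : String) : List String :=
  pvLoopA [] ((PySem.Str.split? ban_list_string ",").getD [])

-- ===== PORT B =====
def pvMapping : PySem.Dict String (List String) :=
  PySem.Dict.ofList
    [("social_media",
      ["weibo", "twitter", "instagram", "zhihu", "douban", "wechat", "xiaohongshu", "reddit"]),
     ("video", ["youtube", "bilibili"])]

-- hand port of Source B's `head, sep, rest = rest.partition(",")` on a one-char separator
-- (exact: a List Char scan for the first ','; `none` = no separator found)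
def pvPartitionComma : List Char → List Char × Option (List Char)
  | [] => ([], none)
  | c :: cs =>
    if c = ',' then ([], some cs)
    else
      let (h, r) := pvPartitionComma cs
      (c :: h, r)

-- termination measure for Source B's while loop: the unscanned suffix shrinks
lemma pvPartition_snd_lt : ∀ (cs h r : List Char), pvPartitionComma cs = (h, some r) → r.length < cs.length := by
  intro cs
  induction cs with
  | nil => intro h r hr; simp [pvPartitionComma] at hr
  | cons c rest ih =>
    intro h r hr
    by_cases hc : c = ','
    · simp [pvPartitionComma, hc] at hr
      obtain ⟨-, rfl⟩ := hr
      simp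
    · rcases hq : pvPartitionComma rest with ⟨h', r'⟩
      simp [pvPartitionComma, hc, hq] at hr
      cases r' with
      | none => simp at hr
      | some rr =>
        obtain ⟨-, hr2⟩ := hr
        obtain rfl := Option.some.inj hr2
        have := ih h' rr hq
        simp
        omega

-- Source B's while loop: two accumulators, one partition per iteration
def pvLoopB (tokens expansions : List String) (rest : List Char) : List String :=
  match hp : pvPartitionComma rest with
  | (head, none) =>
      (tokens ++ [String.ofList head]) ++
        (expansions ++ PySem.Dict.getD pvMapping (String.ofList head) [])
  | (head, some r) =>
      pvLoopB (tokens ++ [String.ofList head])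
        (expansions ++ PySem.Dict.getD pvMapping (String.ofList head) []) r
termination_by rest.length
decreasing_by exact pvPartition_snd_lt _ _ _ hp

def ban_list_resolver_alt (ban_list_string : String) : List String :=
  pvLoopB [] [] ban_list_string.toList

-- ===== PRECONDITION & SPEC =====
def Spec_ban_list_resolver (ban_list_string : String) (out : List String) : Prop := out = ban_list_resolver_alt ban_list_string
instance (ban_list_string : String) (out : List String) : Decidable (Spec_ban_list_resolver ban_list_string out) := by unfold Spec_ban_list_resolver; infer_instance

-- ===== CLAIM (what is proved, stated in full; the proofs are below) =====
def Claim_equal_ban_list_resolver : Prop := ∀ (ban_list_string : String), Dom_ban_list_resolver ban_list_string → Spec_ban_list_resolver ban_list_string (ban_list_resolver ban_list_string)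

-- ===== LEMMAS AND PROOFS =====

-- the token list of a string, by repeated partition (proof-side characterisation)
def pvTokens (cs : List Char) : List (List Char) :=
  match hp : pvPartitionComma cs with
  | (h, none) => [h]
  | (h, some r) => h :: pvTokens r
termination_by cs.length
decreasing_by exact pvPartition_snd_lt _ _ _ hp

lemma pvTokens_of_none (cs h : List Char) (hp : pvPartitionComma cs = (h, none)) :
    pvTokens cs = [h] := by
  rw [pvTokens, hp]

lemma pvTokens_of_some (cs h r : List Char) (hp : pvPartitionComma cs = (h, some r)) :
    pvTokens cs = h :: pvTokens r := by
  rw [pvTokens, hp]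

-- PySem's split worker on the one-char separator "," computes pvTokens
lemma pvGo_eq (fuel : Nat) : ∀ (l cur : List Char) (acc : List (List Char)), l.length < fuel →
    PySem.Chars.splitOn.go [','] fuel l cur acc
      = acc.reverse ++ (pvTokens l).modifyHead (fun t => cur.reverse ++ t) := by
  induction fuel with
  | zero => intro l cur acc h; omega
  | succ n ih =>
    intro l cur acc h
    match l with
    | [] => simp [PySem.Chars.splitOn.go, pvTokens, pvPartitionComma]
    | c :: rest =>
      rw [PySem.Chars.splitOn.go]
      by_cases hc : c = ','
      · subst hc
        have hrest : rest.length < n := by simpa using h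
        simp only [List.isPrefixOf, BEq.rfl, Bool.true_and, List.length_cons, List.length_nil,
          List.drop_succ_cons, List.drop_zero, if_pos]
        rw [ih _ _ _ hrest,
          pvTokens_of_some (',' :: rest) [] rest (by rw [pvPartitionComma]; simp)]
        cases pvTokens rest <;> simp
      · have hrest : rest.length < n := by simpa using h
        rcases hq : pvPartitionComma rest with ⟨h', r'⟩
        have hne : ¬([','].isPrefixOf (c :: rest) = true) := by
          simp only [List.isPrefixOf, Bool.and_eq_true, beq_iff_eq]
          exact fun hh => hc hh.1.symm
        rw [if_neg hne, ih _ _ _ hrest]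
        cases r' with
        | none =>
          rw [pvTokens_of_none rest h' hq,
            pvTokens_of_none (c :: rest) (c :: h') (by rw [pvPartitionComma, if_neg hc, hq])]
          simp
        | some rr =>
          rw [pvTokens_of_some rest h' rr hq,
            pvTokens_of_some (c :: rest) (c :: h') rr (by rw [pvPartitionComma, if_neg hc, hq])]
          simp

lemma pvSplit_comma (s : String) :
    PySem.Str.split? s "," = some ((pvTokens s.toList).map String.ofList) := by
  have h : PySem.Chars.splitOn s.toList [','] = pvTokens s.toList := by
    unfold PySem.Chars.splitOn
    rw [pvGo_eq (s.toList.length + 1) s.toList [] [] (by omega)]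
    cases pvTokens s.toList <;> simp
  simp [PySem.Str.split?, PySem.Chars.split?, h]

-- words appended by an expansion never themselves expand
lemma pvExpandA_expand_nil (x : String) : (pvExpandA x).flatMap pvExpandA = [] := by
  unfold pvExpandA; split_ifs <;> decide

lemma pvLoopA_eq (processed todo : List String) :
    pvLoopA processed todo = processed ++ todo ++ todo.flatMap pvExpandA := by
  induction processed, todo using pvLoopA.induct with
  | case1 p => simp [pvLoopA]
  | case2 p x rest ih =>
    rw [pvLoopA, ih]
    simp [List.flatMap_append, pvExpandA_expand_nil]

-- Source B's dict lookup agrees with A's if/elif expansion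
lemma pvLookup_eq_expand (t : String) :
    PySem.Dict.getD pvMapping t [] = pvExpandA t := by
  by_cases h1 : t = "social_media"
  · subst h1; decide
  by_cases h2 : t = "video"
  · subst h2; decide
  have b1 : ("social_media" == t) = false := beq_eq_false_iff_ne.mpr (fun h => h1 h.symm)
  have b2 : ("video" == t) = false := beq_eq_false_iff_ne.mpr (fun h => h2 h.symm)
  unfold pvMapping pvExpandA
  simp [PySem.Dict.getD, PySem.Dict.get?, PySem.Dict.ofList, PySem.Dict.empty, PySem.Dict.update,
    PySem.Dict.insert, List.find?, b1, b2, h1, h2]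

lemma pvLoopB_eq (tokens expansions : List String) (cs : List Char) :
    pvLoopB tokens expansions cs
      = (tokens ++ (pvTokens cs).map String.ofList) ++
          (expansions ++ ((pvTokens cs).map String.ofList).flatMap pvExpandA) := by
  induction tokens, expansions, cs using pvLoopB.induct with
  | case1 toks exps cs head hp =>
    rw [pvLoopB, hp]
    simp only [pvTokens_of_none cs head hp, pvLookup_eq_expand]
    simp
  | case2 toks exps cs head r hp ih =>
    rw [pvLoopB, hp]
    dsimp only
    rw [ih, pvTokens_of_some cs head r hp, pvLookup_eq_expand]
    simp

-- ===== VERDICT (by name: the statement is the Claim_ definition above) =====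
theorem ban_list_resolver_spec : Claim_equal_ban_list_resolver := by
  intro s _
  unfold Spec_ban_list_resolver ban_list_resolver ban_list_resolver_alt
  rw [pvSplit_comma, pvLoopB_eq, pvLoopA_eq]
  simp
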